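-- pv_equiv track=rewrite | github.com/exorcist-coder-2/News-Detector | credibility.py | get_color_by_score
-- ===== SOURCE A (Python) =====
-- def get_color_by_score(score):
--     """Get color based on credibility score"""
--     score = max(0, min(100, score))
--
--     color_map = [
--         (20, "#c97171"),  # Dark red
--         (40, "#d97777"),  # Red
--         (50, "#dfa676"),  # Orange
--         (60, "#d4a574"),  # Yellow
--         (75, "#8b9d6b"),  # Light green
--         (90, "#6ec46d"),  # Green
--         (100, "#5aad5a")  # Dark green
--     ]
--
--     for threshold, color in color_map:
--         if score < threshold:
--             return color
--     return "#5aad5a"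
-- ===== SOURCE B (Python) =====
-- def get_color_by_score(score):
--     """Get color based on credibility score"""
--     score = max(0, min(100, score))
--     thresholds = [20, 40, 50, 60, 75, 90, 100]
--     colors = ["#c97171", "#d97777", "#dfa676", "#d4a574",
--               "#8b9d6b", "#6ec46d", "#5aad5a"]
--     # binary search for the first threshold strictly greater than score
--     lo, hi = 0, len(thresholds)
--     while lo < hi:
--         mid = (lo + hi) // 2
--         if thresholds[mid] <= score:
--             lo = mid + 1
--         else:
--             hi = mid
--     return colors[lo] if lo < len(colors) else "#5aad5a"
-- ===== Notes on version B (the rewrite author's own statement) =====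
-- stated objective: alternative
-- what changed: Replaces the linear first-hit scan over (threshold,color) pairs with a hand-written bisect_right binary search over a sorted threshold list indexing a parallel color list.
import Mathlib
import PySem

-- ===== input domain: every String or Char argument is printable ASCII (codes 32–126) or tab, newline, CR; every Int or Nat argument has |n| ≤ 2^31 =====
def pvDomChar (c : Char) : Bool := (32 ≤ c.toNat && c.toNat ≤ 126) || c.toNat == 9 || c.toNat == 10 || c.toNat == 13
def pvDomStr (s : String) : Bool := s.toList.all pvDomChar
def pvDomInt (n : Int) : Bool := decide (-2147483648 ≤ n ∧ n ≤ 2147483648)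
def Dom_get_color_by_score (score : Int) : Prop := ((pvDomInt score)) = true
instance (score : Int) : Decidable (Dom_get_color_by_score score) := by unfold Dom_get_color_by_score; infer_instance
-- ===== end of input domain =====

-- B replaces A's linear first-hit scan of the threshold table with a binary search
-- (hand-written bisect_right) over a sorted threshold list and a parallel color list.

-- ===== PORT A =====
-- first (threshold, color) with score < threshold; falls through to the default
def pvScanA (score : Int) : List (Int × String) → String
  | [] => "#5aad5a"
  | (threshold, color) :: rest =>
      if score < threshold then color else pvScanA score rest

def get_color_by_score (score : Int) : String :=
  let score := max 0 (min 100 score)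
  let color_map : List (Int × String) :=
    [(20, "#c97171"), (40, "#d97777"), (50, "#dfa676"), (60, "#d4a574"),
     (75, "#8b9d6b"), (90, "#6ec46d"), (100, "#5aad5a")]
  pvScanA score color_map

-- ===== PORT B =====
-- bisect_right: while lo < hi loop of Source B, recursion on hi - lo
def pvBisectR (ts : List Int) (score : Int) (lo hi : Nat) : Nat :=
  if h : lo < hi then
    let mid := (lo + hi) / 2
    if ts.getD mid 0 ≤ score then pvBisectR ts score (mid + 1) hi
    else pvBisectR ts score lo mid
  else lo
termination_by hi - lo
decreasing_by all_goals omega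

def get_color_by_score_alt (score : Int) : String :=
  let score := max 0 (min 100 score)
  let thresholds : List Int := [20, 40, 50, 60, 75, 90, 100]
  let colors : List String :=
    ["#c97171", "#d97777", "#dfa676", "#d4a574", "#8b9d6b", "#6ec46d", "#5aad5a"]
  let lo := pvBisectR thresholds score 0 thresholds.length
  if lo < colors.length then colors.getD lo "" else "#5aad5a"

-- ===== PRECONDITION & SPEC =====
def Spec_get_color_by_score (score : Int) (out : String) : Prop := out = get_color_by_score_alt score
instance (score : Int) (out : String) : Decidable (Spec_get_color_by_score score out) := by unfold Spec_get_color_by_score; infer_instance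

-- ===== CLAIM (what is proved, stated in full; the proofs are below) =====
def Claim_equal_get_color_by_score : Prop := ∀ (score : Int), Dom_get_color_by_score score → Spec_get_color_by_score score (get_color_by_score score)

-- ===== LEMMAS AND PROOFS =====
theorem pv_clamped_eq (c : Int) (h0 : 0 ≤ c) (h1 : c ≤ 100) :
    get_color_by_score c = get_color_by_score_alt c := by
  interval_cases c <;> simp [get_color_by_score, get_color_by_score_alt, pvScanA, pvBisectR]

-- ===== VERDICT (by name: the statement is the Claim_ definition above) =====
theorem get_color_by_score_spec : Claim_equal_get_color_by_score := by
  intro score _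
  unfold Spec_get_color_by_score
  have hclamp : max 0 (min 100 score) = max 0 (min 100 (max 0 (min 100 score))) := by omega
  have hA : get_color_by_score score = get_color_by_score (max 0 (min 100 score)) := by
    unfold get_color_by_score; rw [← hclamp]
  have hB : get_color_by_score_alt score = get_color_by_score_alt (max 0 (min 100 score)) := by
    unfold get_color_by_score_alt; rw [← hclamp]
  rw [hA, hB]
  exact pv_clamped_eq _ (by omega) (by omega)
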